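-- pv_equiv track=rewrite | github.com/ewanmwalker/NCL_Uni_Python_R_Analysis_Code | Q6.py | enumcount
-- ===== SOURCE A (Python) =====
-- def enumcount(x):
--     n = len(x)
--     c = [0 for i in range(n)]
--     for i in range(1,n):
--         for j in range(0,i):
--             if x[i] > x[j]:
--                 c[j] = c[j]+1
--             else:
--                 c[i] = c[i]+1
--     return c
-- ===== SOURCE B (Python) =====
-- def enumcount(x):
--     # c[k] = (# elements of x strictly greater than x[k]) + (# earlier elements equal to x[k]).
--     # Count multiplicities once, get "greater than v" counts by a prefix sum over the
--     # distinct values sorted in decreasing order, then one pass over x with a running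
--     # counter of duplicates seen so far.  O(n log n) instead of A's O(n^2).
--     cnt = {}
--     for v in x:
--         cnt[v] = cnt.get(v, 0) + 1
--     gt = {}
--     acc = 0
--     for v in sorted(cnt, reverse=True):
--         gt[v] = acc
--         acc += cnt[v]
--     out = []
--     seen = {}
--     for v in x:
--         out.append(gt[v] + seen.get(v, 0))
--         seen[v] = seen.get(v, 0) + 1
--     return out
-- ===== Notes on version B (the rewrite author's own statement) =====
-- stated objective: faster
-- what changed: Replaces the O(n^2) pairwise double loop by the identity c[k] = (# elements of x greater than x[k]) + (# earlier elements equal to x[k]), computed with a multiplicity counter, a prefix sum over the distinct values sorted descending, and one final pass with a running duplicate counter.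
import Mathlib
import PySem

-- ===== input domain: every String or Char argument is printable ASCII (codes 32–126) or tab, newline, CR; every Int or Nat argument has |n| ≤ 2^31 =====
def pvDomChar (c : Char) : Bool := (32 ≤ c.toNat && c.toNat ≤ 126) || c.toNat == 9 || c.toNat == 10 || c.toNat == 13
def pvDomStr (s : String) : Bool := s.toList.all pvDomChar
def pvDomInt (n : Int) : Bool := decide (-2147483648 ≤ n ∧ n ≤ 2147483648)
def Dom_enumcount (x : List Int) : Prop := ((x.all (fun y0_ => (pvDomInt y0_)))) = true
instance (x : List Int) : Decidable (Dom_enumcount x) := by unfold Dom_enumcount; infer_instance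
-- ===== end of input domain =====

-- B replaces A's O(n^2) pairwise double loop by counting (multiplicities + a prefix sum over the
-- distinct values sorted descending + one pass with a running duplicate counter): asymptotically faster.

-- ===== PORT A =====
def enumcount (x : List Int) : List Int :=
  let n : Int := PySem.List.len x
  let c : List Int := (PySem.List.pyRange 0 n 1).map (fun _ => 0)
  (PySem.List.pyRange 1 n 1).foldl (fun c i =>
    (PySem.List.pyRange 0 i 1).foldl (fun c j =>
      if PySem.List.pyGetD x i 0 > PySem.List.pyGetD x j 0 then
        PySem.List.pySetD c j (PySem.List.pyGetD c j 0 + 1)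
      else
        PySem.List.pySetD c i (PySem.List.pyGetD c i 0 + 1)) c) c

-- ===== PORT B =====
-- Source B's three loops in order: the counter dict, the prefix-sum dict over sorted(cnt, reverse=True),
-- and the output pass with the `seen` counter.  Python's `gt[v]` never raises (v is always a key of
-- gt, which holds every distinct value of x); `.getD v 0` is exact there.
def enumcount_alt (x : List Int) : List Int :=
  let cnt : PySem.Dict Int Int := x.foldl (fun d v => d.insert v (d.getD v 0 + 1)) PySem.Dict.empty
  let gtAcc : PySem.Dict Int Int × Int :=
    (PySem.List.sorted cnt.keys (fun v => v) true).foldl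
      (fun p v => (p.1.insert v p.2, p.2 + cnt.getD v 0)) (PySem.Dict.empty, 0)
  let gt := gtAcc.1
  (x.foldl (fun (p : List Int × PySem.Dict Int Int) v =>
      (p.1 ++ [gt.getD v 0 + p.2.getD v 0], p.2.insert v (p.2.getD v 0 + 1)))
    ([], PySem.Dict.empty)).1

-- ===== PRECONDITION & SPEC =====
def Spec_enumcount (x : List Int) (out : List Int) : Prop := out = enumcount_alt x
instance (x : List Int) (out : List Int) : Decidable (Spec_enumcount x out) := by unfold Spec_enumcount; infer_instance

-- ===== CLAIM (what is proved, stated in full; the proofs are below) =====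
def Claim_equal_enumcount : Prop := ∀ (x : List Int), Dom_enumcount x → Spec_enumcount x (enumcount x)

-- ===== LEMMAS AND PROOFS =====

-- Nat-indexed form of A's inner-loop body
def pvStepJ (x : List Int) (i : Nat) (c : List Int) (j : Nat) : List Int :=
  if x.getD j 0 < x.getD i 0 then c.set j (c.getD j 0 + 1) else c.set i (c.getD i 0 + 1)

-- closed form for A's c after the outer iterations i = 1, …, I-1
def pvG (x : List Int) (I k : Nat) : Int :=
  if k < I then
    (((x.take I).drop (k + 1)).countP (fun w => decide (x.getD k 0 < w)) : Int)
      + ((x.take k).countP (fun w => decide (x.getD k 0 ≤ w)) : Int)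
  else 0

def pvC (x : List Int) (I : Nat) : List Int := (List.range x.length).map (pvG x I)

-- per-element value B computes
def pvB (x : List Int) (k : Nat) : Int :=
  (x.countP (fun w => decide (x.getD k 0 < w)) : Int) + ((x.take k).count (x.getD k 0) : Int)

theorem pv_set_map_range (n : Nat) (F : Nat → Int) (j : Nat) (v : Int) :
    ((List.range n).map F).set j v = (List.range n).map (fun k => if k = j then v else F k) := by
  apply List.ext_getElem
  · simp
  · intro k h1 h2
    rw [List.getElem_set]
    simp only [List.getElem_map, List.getElem_range]
    by_cases h : k = j
    · simp [h]
    · simp [h, Ne.symm h]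

theorem pv_getD_map_range (n : Nat) (F : Nat → Int) (j : Nat) (hj : j < n) :
    ((List.range n).map F).getD j 0 = F j := by
  have : j < ((List.range n).map F).length := by simpa using hj
  simp [List.getD_eq_getElem?_getD, List.getElem?_eq_getElem this]

-- A's port equals the Nat-indexed loops
theorem pvA_bridge (x : List Int) :
    enumcount x = (List.range (x.length - 1)).foldl
      (fun c t => (List.range (t + 1)).foldl (pvStepJ x (t + 1)) c)
      ((List.range x.length).map (fun _ => (0 : Int))) := by
  unfold enumcount pvStepJ
  simp only [PySem.List.len_eq, PySem.List.pyRange_one, List.foldl_map, List.map_map]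
  have h1 : ((x.length : Int) - 1).toNat = x.length - 1 := by omega
  have h2 : ((x.length : Int) - 0).toNat = x.length := by omega
  rw [h1, h2]
  congr 1
  funext c t
  have h3 : (1 + (t:Int) - 0).toNat = t + 1 := by omega
  rw [h3]
  congr 1
  funext c j
  have e1 : (0 + (j:Int)) = ((j : Nat) : Int) := by omega
  have e2 : (1 + (t:Int)) = ((t + 1 : Nat) : Int) := by push_cast; omega
  rw [e1, e2]
  simp only [PySem.List.pyGetD_natCast, PySem.List.pySetD_natCast, gt_iff_lt]

-- inner loop closed form
theorem pvInner (x : List Int) (i : Nat) (hi : i < x.length) (c : List Int)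
    (hc : c.length = x.length) (m : Nat) (hm : m ≤ i) :
    (List.range m).foldl (pvStepJ x i) c =
    (List.range x.length).map (fun k =>
      c.getD k 0 + (if k < m ∧ x.getD k 0 < x.getD i 0 then 1 else 0)
        + (if k = i then ((x.take m).countP (fun w => decide (x.getD i 0 ≤ w)) : Int) else 0)) := by
  induction m with
  | zero =>
    simp only [List.range_zero, List.foldl_nil, List.take_zero, List.countP_nil, Nat.cast_zero]
    apply List.ext_getElem
    · simp [hc]
    · intro k h1 h2
      simp only [List.getElem_map, List.getElem_range]
      have hk : k < c.length := by simpa [hc] using h2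
      simp [List.getD_eq_getElem?_getD, List.getElem?_eq_getElem hk]
  | succ m ih =>
    have hm' : m ≤ i := by omega
    have hmx : m < x.length := by omega
    rw [List.range_succ, List.foldl_append, List.foldl_cons, List.foldl_nil, ih hm']
    have hcount : ((x.take (m+1)).countP (fun w => decide (x.getD i 0 ≤ w)) : Int)
        = ((x.take m).countP (fun w => decide (x.getD i 0 ≤ w)) : Int)
          + (if x.getD i 0 ≤ x.getD m 0 then 1 else 0) := by
      have htake : x.take (m+1) = x.take m ++ [x[m]] := by
        rw [List.take_add_one, List.getElem?_eq_getElem hmx]; rfl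
      have hgetm : x.getD m 0 = x[m] := by
        simp [List.getD_eq_getElem?_getD, List.getElem?_eq_getElem hmx]
      rw [htake, List.countP_append, hgetm]
      by_cases h : x.getD i 0 ≤ x[m] <;> simp [List.countP_cons, h]
    unfold pvStepJ
    by_cases hlt : x.getD m 0 < x.getD i 0
    · rw [if_pos hlt, pv_getD_map_range _ _ m hmx, pv_set_map_range]
      apply List.map_congr_left
      intro k hk
      rw [hcount]
      split_ifs <;> subst_vars <;> omega
    · rw [if_neg hlt, pv_getD_map_range _ _ i hi, pv_set_map_range]
      apply List.map_congr_left
      intro k hk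
      rw [hcount]
      by_cases hkm : k = m
      · subst hkm; split_ifs <;> subst_vars <;> omega
      · split_ifs <;> subst_vars <;> omega

-- outer loop closed form
theorem pvOuter (x : List Int) (m : Nat) (hm : m ≤ x.length - 1) :
    (List.range m).foldl (fun c t => (List.range (t + 1)).foldl (pvStepJ x (t + 1)) c)
      ((List.range x.length).map (fun _ => (0 : Int))) = pvC x (m + 1) := by
  induction m with
  | zero =>
    simp only [List.range_zero, List.foldl_nil, pvC]
    apply List.map_congr_left
    intro k hk
    unfold pvG
    split_ifs with h
    · have hk0 : k = 0 := by omega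
      subst hk0
      have hd : (x.take 1).drop 1 = [] := by
        apply List.drop_eq_nil_of_le; simp
      simp [hd]
    · rfl
  | succ m ih =>
    have hm' : m ≤ x.length - 1 := by omega
    have hi : m + 1 < x.length := by omega
    rw [List.range_succ, List.foldl_append, List.foldl_cons, List.foldl_nil, ih hm']
    rw [pvC, pvInner x (m+1) hi _ (by simp) (m+1) le_rfl]
    unfold pvC
    apply List.map_congr_left
    intro k hk
    have hkx : k < x.length := List.mem_range.mp hk
    rw [pv_getD_map_range _ _ k hkx]
    have htake : x.take (m+2) = x.take (m+1) ++ [x[m+1]] := by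
      rw [List.take_add_one, List.getElem?_eq_getElem hi]; rfl
    unfold pvG
    by_cases hki : k = m + 1
    · rw [hki]
      have h1 : ¬ (m + 1 < m + 1) := by omega
      have h2 : m + 1 < m + 2 := by omega
      have hd : (x.take (m+2)).drop (m+2) = [] := by
        apply List.drop_eq_nil_of_le; simp
      have h3 : ¬ (m + 1 < m + 1 ∧ x.getD (m+1) 0 < x.getD (m+1) 0) := by omega
      rw [if_neg h1, if_pos h2, if_neg h3, if_pos rfl, hd]
      simp
    · by_cases hkm : k < m + 1
      · have h2 : k < m + 2 := by omega
        rw [if_pos hkm, if_pos h2, if_neg hki]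
        have hdk : k + 1 ≤ (x.take (m+1)).length := by simp; omega
        have hsplit : (x.take (m+2)).drop (k+1) = (x.take (m+1)).drop (k+1) ++ [x[m+1]] := by
          rw [htake, List.drop_append_of_le_length hdk]
        have hgm : x.getD (m+1) 0 = x[m+1] := by
          simp [List.getD_eq_getElem?_getD, List.getElem?_eq_getElem hi]
        have hone : (([x[m+1]]).countP (fun w => decide (x.getD k 0 < w)) : Int)
            = if x.getD k 0 < x.getD (m+1) 0 then 1 else 0 := by
          rw [hgm]
          by_cases h : x.getD k 0 < x[m+1] <;> simp [h]
        rw [hsplit, List.countP_append]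
        push_cast
        rw [hone]
        split_ifs <;> omega
      · have h1 : ¬ (k < m + 2) := by omega
        have h2 : ¬ (k < m + 1 ∧ x.getD k 0 < x.getD (m+1) 0) := by tauto
        simp [hkm, h1, h2, hki]

-- A characterization
theorem pvA_char (x : List Int) : enumcount x = pvC x x.length := by
  rw [pvA_bridge]
  rcases Nat.eq_zero_or_pos x.length with h | h
  · have hx : x = [] := List.length_eq_zero_iff.mp h
    subst hx
    rfl
  · rw [pvOuter x (x.length - 1) le_rfl]
    congr 1
    omega

-- ===== B side =====

-- a fold over keys not containing v leaves getD v unchanged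
theorem pvGtSkip (cnt : PySem.Dict Int Int) (l : List Int) (v : Int) (hv : v ∉ l) :
    ∀ (d : PySem.Dict Int Int) (acc : Int),
    ((l.foldl (fun p w => (p.1.insert w p.2, p.2 + cnt.getD w 0)) (d, acc)).1).getD v 0
      = d.getD v 0 := by
  induction l with
  | nil => intro d acc; rfl
  | cons w r ih =>
    intro d acc
    have hvw : v ≠ w := fun h => hv (h ▸ List.mem_cons_self)
    have hvr : v ∉ r := fun h => hv (List.mem_cons_of_mem _ h)
    rw [List.foldl_cons, ih hvr, PySem.Dict.getD_insert, if_neg hvw]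

-- value of the prefix-sum dict at v ∈ l, for l strictly decreasing
theorem pvGtFold (cnt : PySem.Dict Int Int) (l : List Int)
    (hp : l.Pairwise (fun a b => b < a)) (v : Int) (hv : v ∈ l) :
    ∀ (d : PySem.Dict Int Int) (acc : Int),
    ((l.foldl (fun p w => (p.1.insert w p.2, p.2 + cnt.getD w 0)) (d, acc)).1).getD v 0
      = acc + ((l.filter (fun w => decide (v < w))).map (fun w => cnt.getD w 0)).sum := by
  induction l with
  | nil => cases hv
  | cons w r ih =>
    intro d acc
    rw [List.foldl_cons]
    have hhead : ∀ u ∈ r, u < w := fun u hu => (List.pairwise_cons.mp hp).1 u hu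
    rcases List.mem_cons.mp hv with rfl | hvr
    · have hnr : v ∉ r := fun h => lt_irrefl v (hhead v h)
      rw [pvGtSkip cnt r v hnr, PySem.Dict.getD_insert, if_pos rfl]
      have hf : (v :: r).filter (fun u => decide (v < u)) = [] := by
        rw [List.filter_eq_nil_iff]
        intro u hu
        rcases List.mem_cons.mp hu with rfl | hur
        · simp
        · simp [not_lt.mpr (le_of_lt (hhead u hur))]
      rw [hf]
      simp
    · rw [ih (List.pairwise_cons.mp hp).2 hvr]
      have hvw : v < w := hhead v hvr
      have : (w :: r).filter (fun u => decide (v < u))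
          = w :: r.filter (fun u => decide (v < u)) := by
        simp [hvw]
      rw [this, List.map_cons, List.sum_cons]
      ring

theorem pvCountPOr (x : List Int) (q1 q2 : Int → Bool)
    (hd : ∀ a, ¬(q1 a = true ∧ q2 a = true)) :
    x.countP (fun a => q1 a || q2 a) = x.countP q1 + x.countP q2 := by
  induction x with
  | nil => rfl
  | cons a r ih =>
    simp only [List.countP_cons, ih]
    rcases h1 : q1 a <;> rcases h2 : q2 a <;> simp [h1, h2] <;> first | omega | exact absurd ⟨h1, h2⟩ (hd a)

theorem pvCountPEq (x : List Int) (p : Int → Bool) (w : Int) :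
    x.countP (fun a => p a && (a == w)) = if p w then x.count w else 0 := by
  by_cases hp : p w = true
  · rw [if_pos hp, List.count_eq_countP]
    apply List.countP_congr
    intro a _
    by_cases haw : a = w
    · subst haw; simp [hp]
    · simp [haw]
  · rw [if_neg hp]
    have : x.countP (fun a => p a && (a == w)) = x.countP (fun _ => false) := by
      apply List.countP_congr
      intro a _
      by_cases haw : a = w
      · subst haw; simp [Bool.eq_false_iff.mpr hp]
      · simp [haw]
    rw [this, List.countP_false]
    rfl

theorem pvSumList (x : List Int) (p : Int → Bool) (l : List Int) (hn : l.Nodup) :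
    ((l.filter p).map (fun w => (x.count w : Int))).sum
      = (x.countP (fun a => p a && decide (a ∈ l)) : Int) := by
  induction l with
  | nil => simp
  | cons w r ih =>
    have hw : w ∉ r := (List.nodup_cons.mp hn).1
    have hr : r.Nodup := (List.nodup_cons.mp hn).2
    have hsplit : x.countP (fun a => p a && decide (a ∈ w :: r))
        = x.countP (fun a => p a && (a == w)) + x.countP (fun a => p a && decide (a ∈ r)) := by
      rw [← pvCountPOr]
      · apply List.countP_congr
        intro a _
        by_cases haw : a = w
        · subst haw; simp; tauto
        · by_cases har : a ∈ r <;> simp [haw, har]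
      · intro a ⟨h1, h2⟩
        simp only [Bool.and_eq_true, beq_iff_eq, decide_eq_true_eq] at h1 h2
        exact hw (h1.2 ▸ h2.2)
    rw [hsplit, pvCountPEq]
    by_cases hpw : p w = true
    · simp only [List.filter_cons, hpw, if_pos, List.map_cons, List.sum_cons, ih hr]
      push_cast
      ring
    · simp [List.filter_cons, hpw, ih hr]

-- the output loop: running `seen` counter gives the count in the processed prefix
theorem pvOut (gt : PySem.Dict Int Int) (s : List Int) :
    ∀ (o : List Int) (pre : List Int),
    (s.foldl (fun p v => (p.1 ++ [gt.getD v 0 + p.2.getD v 0], p.2.insert v (p.2.getD v 0 + 1)))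
      (o, pre.foldl (fun d w => d.insert w (d.getD w 0 + 1)) PySem.Dict.empty)).1
    = o ++ (List.range s.length).map
        (fun k => gt.getD (s.getD k 0) 0 + (((pre ++ s.take k).count (s.getD k 0) : Nat) : Int)) := by
  induction s with
  | nil => intro o pre; simp
  | cons v r ih =>
    intro o pre
    rw [List.foldl_cons]
    have hseen : (pre.foldl (fun d w => d.insert w (d.getD w 0 + 1)) PySem.Dict.empty).getD v 0
        = (pre.count v : Int) := by
      rw [PySem.Dict.getD_foldl_insert_add_one, PySem.Dict.getD_empty]
      ring
    have hdict : (pre.foldl (fun d w => d.insert w (d.getD w 0 + 1)) PySem.Dict.empty).insert v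
          ((pre.count v : Int) + 1)
        = (pre ++ [v]).foldl (fun d w => d.insert w (d.getD w 0 + 1)) PySem.Dict.empty := by
      rw [List.foldl_append, List.foldl_cons, List.foldl_nil, hseen]
    rw [hseen, hdict, ih (o ++ [gt.getD v 0 + (pre.count v : Int)]) (pre ++ [v])]
    rw [List.append_assoc]
    congr 1
    rw [List.length_cons, List.range_succ_eq_map, List.map_cons]
    simp only [List.getD_cons_zero, List.take_zero, List.append_nil, List.singleton_append]
    congr 1
    rw [List.map_map]
    apply List.map_congr_left
    intro k hk
    simp only [Function.comp_apply, Nat.succ_eq_add_one, List.getD_cons_succ, List.take_succ_cons]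
    rw [List.append_assoc]
    rfl

-- B characterization
theorem pvB_char (x : List Int) : enumcount_alt x = (List.range x.length).map (pvB x) := by
  unfold enumcount_alt
  simp only [PySem.Dict.foldl_insert_getD_add_one_eq_counter, PySem.Dict.keys_counter]
  have h2 : (PySem.List.sorted (PySem.Set.ofList x) (fun v : Int => v) true).Nodup :=
    (PySem.List.sorted_perm (PySem.Set.ofList x) (fun v : Int => v) true).nodup_iff.mpr
      (PySem.Set.nodup_ofList x)
  have hds : (PySem.List.sorted (PySem.Set.ofList x) (fun v : Int => v) true).Pairwise
      (fun a b : Int => b < a) :=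
    ((PySem.List.sorted_pairwise_rev (PySem.Set.ofList x) (fun v : Int => v)).and h2).imp
      (fun hab => lt_of_le_of_ne hab.1 (Ne.symm hab.2))
  set G := (List.foldl (fun p v => (p.1.insert v p.2, p.2 + (PySem.Dict.counter x).getD v 0))
      (PySem.Dict.empty, 0) (PySem.List.sorted (PySem.Set.ofList x) (fun v => v) true)).1 with hG
  have hout := pvOut G x [] []
  simp only [List.foldl_nil] at hout
  rw [hout, List.nil_append]
  apply List.map_congr_left
  intro k hk
  have hkx : k < x.length := List.mem_range.mp hk
  have hgk : x.getD k 0 = x[k] := by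
    simp [List.getD_eq_getElem?_getD, List.getElem?_eq_getElem hkx]
  have hmem : x.getD k 0 ∈ x := hgk ▸ List.getElem_mem hkx
  have hvds : x.getD k 0 ∈ PySem.List.sorted (PySem.Set.ofList x) (fun v : Int => v) true :=
    (PySem.List.mem_sorted _ _ _ _).mpr ((PySem.Set.mem_ofList x _).mpr hmem)
  rw [hG, pvGtFold (PySem.Dict.counter x) _ hds _ hvds PySem.Dict.empty 0]
  have hmapc : ((PySem.List.sorted (PySem.Set.ofList x) (fun v : Int => v) true).filter
        (fun w => decide (x.getD k 0 < w))).map (fun w => (PySem.Dict.counter x).getD w 0)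
      = ((PySem.List.sorted (PySem.Set.ofList x) (fun v : Int => v) true).filter
        (fun w => decide (x.getD k 0 < w))).map (fun w => (x.count w : Int)) := by
    apply List.map_congr_left
    intro w _
    exact PySem.Dict.getD_counter x w
  rw [hmapc, pvSumList x _ _ h2]
  have hcp : x.countP (fun a => decide (x.getD k 0 < a)
        && decide (a ∈ PySem.List.sorted (PySem.Set.ofList x) (fun v : Int => v) true))
      = x.countP (fun a => decide (x.getD k 0 < a)) := by
    apply List.countP_congr
    intro a ha
    have : a ∈ PySem.List.sorted (PySem.Set.ofList x) (fun v : Int => v) true :=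
      (PySem.List.mem_sorted _ _ _ _).mpr ((PySem.Set.mem_ofList x _).mpr ha)
    simp [this]
  rw [hcp]
  simp only [pvB, List.nil_append, zero_add]

-- ≤-count split
theorem pvLeCount (l : List Int) (v : Int) :
    l.countP (fun w => decide (v ≤ w)) = l.countP (fun w => decide (v < w)) + l.count v := by
  induction l with
  | nil => rfl
  | cons w r ih =>
    simp only [List.countP_cons, List.count_cons, ih]
    by_cases h1 : v < w
    · have h2 : v ≤ w := le_of_lt h1
      have h3 : ¬ (w = v) := by omega
      simp [h1, h2, h3]
      omega
    · by_cases h2 : v = w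
      · subst h2; simp; omega
      · have h3 : ¬ (v ≤ w) := by omega
        have h4 : ¬ (w = v) := fun h => h2 h.symm
        simp [h1, h3, h4]

-- pointwise identity
theorem pv_pointwise (x : List Int) (k : Nat) (hk : k < x.length) : pvG x x.length k = pvB x k := by
  unfold pvG pvB
  rw [if_pos hk, List.take_length]
  have hsplit : x.countP (fun w => decide (x.getD k 0 < w))
      = (x.take (k+1)).countP (fun w => decide (x.getD k 0 < w))
        + (x.drop (k+1)).countP (fun w => decide (x.getD k 0 < w)) := by
    have h := (List.countP_append (p := fun w => decide (x.getD k 0 < w))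
      (l₁ := x.take (k+1)) (l₂ := x.drop (k+1)))
    rw [List.take_append_drop] at h
    exact h
  have htake : x.take (k+1) = x.take k ++ [x[k]] := by
    rw [List.take_add_one, List.getElem?_eq_getElem hk]; rfl
  have hgk : x.getD k 0 = x[k] := by
    simp [List.getD_eq_getElem?_getD, List.getElem?_eq_getElem hk]
  have htk : (x.take (k+1)).countP (fun w => decide (x.getD k 0 < w))
      = (x.take k).countP (fun w => decide (x.getD k 0 < w)) := by
    rw [htake, List.countP_append, hgk]
    simp
  rw [hsplit, htk, pvLeCount]
  push_cast
  ring

-- ===== VERDICT (by name: the statement is the Claim_ definition above) =====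
theorem enumcount_spec : Claim_equal_enumcount := by
  intro x _
  unfold Spec_enumcount
  rw [pvA_char, pvB_char, pvC]
  exact List.map_congr_left (fun k hk => pv_pointwise x k (List.mem_range.mp hk))
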